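-- pv_equiv track=rewrite | github.com/hencaric/SCNewsBot | scnewsbot/extensions/announcements.py | reformat_description
-- ===== SOURCE A (Python) =====
-- def reformat_description(description: str) -> str:
--     split_description = description.split("\n")
--
--     for index, line in enumerate(split_description):
--         if line.startswith("-"):
--             split_description[index] = "➣" + line[1:]
--         elif line.startswith("+"):
--             split_description[index] = "ㅤ✦" + line[1:]
--
--     return "\n".join(split_description)
-- ===== SOURCE B (Python) =====
-- import re
--
--
-- def reformat_description(description: str) -> str:
--     description = re.sub(r"(?m)^-", "\u27a3", description)
--     description = re.sub(r"(?m)^\+", "\u3164\u2726", description)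
--     return description
-- ===== Notes on version B (the rewrite author's own statement) =====
-- stated objective: idiomatic
-- what changed: Replaces A's split-into-lines / indexed mutate-in-place loop / join pipeline with two multiline regex substitutions (the dash pattern first, then the plus pattern, each anchored at line starts) driven directly over the raw string, with no line list or index maintained.
import Mathlib
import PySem

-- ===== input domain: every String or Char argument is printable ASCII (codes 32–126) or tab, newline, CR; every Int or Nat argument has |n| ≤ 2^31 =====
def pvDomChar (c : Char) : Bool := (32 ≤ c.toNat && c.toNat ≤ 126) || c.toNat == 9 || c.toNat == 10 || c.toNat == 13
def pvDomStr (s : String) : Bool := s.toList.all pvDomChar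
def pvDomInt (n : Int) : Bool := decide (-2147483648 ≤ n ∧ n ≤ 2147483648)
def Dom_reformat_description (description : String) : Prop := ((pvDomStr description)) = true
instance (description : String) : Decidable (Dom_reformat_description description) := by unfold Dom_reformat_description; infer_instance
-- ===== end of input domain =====

-- B replaces A's split/indexed-loop/join with two regex-style single-pass line-start substitutions over the raw string (objective: idiomatic; timing advisory).

-- ===== PORT A =====
def reformat_description (description : String) : String :=
  -- description.split("\n"); sep is the nonempty "\n", so split? is always some
  let split_description := (PySem.Str.split? description "\n").getD []
  -- for index, line in enumerate(split_description): in-place assignment split_description[index] = …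
  let split_description :=
    (PySem.List.enumerate split_description).foldl
      (fun acc (p : Int × String) =>
        if PySem.Str.startswith p.2 "-" then
          -- "➣" + line[1:]  (string concatenation built on code points)
          acc.set p.1.toNat (String.ofList ("➣".toList ++ (PySem.Str.slice p.2 (some 1) none).toList))
        else if PySem.Str.startswith p.2 "+" then
          -- "ㅤ✦" + line[1:]
          acc.set p.1.toNat (String.ofList ("ㅤ✦".toList ++ (PySem.Str.slice p.2 (some 1) none).toList))
        else acc)
      split_description
  PySem.Str.join "\n" split_description

-- ===== PORT B =====
-- Hand port of re.sub(r'(?m)^P', rep, s) for a single literal character P: one left-to-right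
-- scan with an at-line-start flag ((?m)^ holds at position 0 and right after every '\n');
-- exact for these patterns/replacements (no backslashes, no groups).
def pvSubLineStart (pat : Char) (rep : List Char) : Bool → List Char → List Char
  | _, [] => []
  | atStart, c :: rest =>
    if atStart && (c == pat) then rep ++ pvSubLineStart pat rep false rest
    else c :: pvSubLineStart pat rep (c == '\n') rest

def reformat_description_alt (description : String) : String :=
  String.ofList
    (pvSubLineStart '+' "ㅤ✦".toList true
      (pvSubLineStart '-' "➣".toList true description.toList))

-- ===== PRECONDITION & SPEC =====
def Spec_reformat_description (description : String) (out : String) : Prop := out = reformat_description_alt description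
instance (description : String) (out : String) : Decidable (Spec_reformat_description description out) := by unfold Spec_reformat_description; infer_instance

-- ===== CLAIM (what is proved, stated in full; the proofs are below) =====
def Claim_equal_reformat_description : Prop := ∀ (description : String), Dom_reformat_description description → Spec_reformat_description description (reformat_description description)

-- ===== LEMMAS AND PROOFS =====

-- Simple spec of splitting at '\n' (used to characterise PySem.Chars.splitOn on the single-char sep)
def pvSplitNl : List Char → List (List Char)
  | [] => [[]]
  | c :: rest =>
    if c = '\n' then [] :: pvSplitNl rest
    else (c :: (pvSplitNl rest).headI) :: (pvSplitNl rest).tail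

-- A's per-line transform, on code points
def pvLineSub (pat : Char) (rep : List Char) (l : List Char) : List Char :=
  if PySem.Chars.startswith l [pat] then rep ++ l.tail else l

def pvF (l : List Char) : List Char :=
  if PySem.Chars.startswith l ['-'] then "➣".toList ++ l.tail
  else if PySem.Chars.startswith l ['+'] then "ㅤ✦".toList ++ l.tail
  else l

lemma pvSplitNl_ne_nil (cs : List Char) : pvSplitNl cs ≠ [] := by
  cases cs with
  | nil => simp [pvSplitNl]
  | cons c rest => unfold pvSplitNl; split <;> simp

lemma pvSplitNl_no_nl (cs : List Char) : ∀ l ∈ pvSplitNl cs, '\n' ∉ l := by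
  induction cs with
  | nil => simp [pvSplitNl]
  | cons c rest ih =>
    unfold pvSplitNl
    split
    · simpa using ih
    · rename_i hc
      intro l hl
      rcases (List.mem_cons.mp (by simpa [List.cons_head!_tail, (pvSplitNl_ne_nil rest)] using hl :
          l ∈ (c :: (pvSplitNl rest).headI) :: (pvSplitNl rest).tail)) with h1 | h1
      · subst h1
        intro hm
        rcases List.mem_cons.mp hm with h2 | h2
        · exact hc h2.symm
        · rcases List.exists_cons_of_ne_nil (pvSplitNl_ne_nil rest) with ⟨h0, t0, ht⟩
          have hm2 : (pvSplitNl rest).headI ∈ pvSplitNl rest := by rw [ht]; simp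
          exact ih _ hm2 h2
      · rcases List.exists_cons_of_ne_nil (pvSplitNl_ne_nil rest) with ⟨h0, t0, ht⟩
        have hm2 : l ∈ pvSplitNl rest := by rw [ht]; exact List.mem_cons_of_mem _ (by simpa [ht] using h1)
        exact ih l hm2

lemma pvJoin_splitNl (cs : List Char) :
    PySem.Chars.join ['\n'] (pvSplitNl cs) = cs := by
  induction cs with
  | nil => simp [pvSplitNl, PySem.Chars.join_singleton]
  | cons c rest ih =>
    rcases List.exists_cons_of_ne_nil (pvSplitNl_ne_nil rest) with ⟨h0, t0, ht⟩
    unfold pvSplitNl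
    split
    · rename_i hc
      subst hc
      rw [ht]
      rw [ht] at ih
      rw [PySem.Chars.join_cons_cons]
      simpa using ih
    · rw [ht]
      rw [ht] at ih
      simp only [List.headI_cons, List.tail_cons]
      cases t0 with
      | nil =>
        rw [PySem.Chars.join_singleton] at ih ⊢
        simp [ih]
      | cons l2 t2 =>
        rw [PySem.Chars.join_cons_cons] at ih ⊢
        simp [← ih]

lemma pv_go_spec (fuel : Nat) (l cur : List Char) (acc : List (List Char)) (h : l.length ≤ fuel) :
    PySem.Chars.splitOn.go ['\n'] fuel l cur acc
      = acc.reverse ++ (cur.reverse ++ (pvSplitNl l).headI) :: (pvSplitNl l).tail := by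
  induction fuel generalizing l cur acc with
  | zero =>
    have hl : l = [] := List.eq_nil_of_length_eq_zero (Nat.le_zero.mp h)
    subst hl
    simp [PySem.Chars.splitOn.go, pvSplitNl]
  | succ fuel ih =>
    cases l with
    | nil => simp [PySem.Chars.splitOn.go, pvSplitNl]
    | cons c restl =>
      rw [PySem.Chars.splitOn.go]
      by_cases hc : c = '\n'
      · subst hc
        have hpre : ['\n'].isPrefixOf ('\n' :: restl) = true := by simp [List.isPrefixOf]
        rw [if_pos hpre]
        have := ih restl [] (cur.reverse :: acc) (by simpa using Nat.le_of_succ_le_succ h)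
        simp only [List.length_singleton, List.drop_succ_cons, List.drop_zero] at ⊢
        rw [this]
        rcases List.exists_cons_of_ne_nil (pvSplitNl_ne_nil restl) with ⟨h0, t0, ht⟩
        simp [pvSplitNl, ht]
      · have hpre : ['\n'].isPrefixOf (c :: restl) = false := by
          simp [List.isPrefixOf, beq_eq_false_iff_ne.mpr (Ne.symm hc)]
        rw [hpre]
        simp only [Bool.false_eq_true, if_false]
        have := ih restl (c :: cur) acc (by simpa using Nat.le_of_succ_le_succ h)
        rw [this]
        rcases List.exists_cons_of_ne_nil (pvSplitNl_ne_nil restl) with ⟨h0, t0, ht⟩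
        simp [pvSplitNl, ht, hc]

lemma pvSplitOn_eq (cs : List Char) :
    PySem.Chars.splitOn cs ['\n'] = pvSplitNl cs := by
  unfold PySem.Chars.splitOn
  rw [pv_go_spec (cs.length + 1) cs [] [] (Nat.le_succ _)]
  rcases List.exists_cons_of_ne_nil (pvSplitNl_ne_nil cs) with ⟨h0, t0, ht⟩
  simp [ht]

lemma pvSub_false_no_nl (pat : Char) (rep l rest : List Char) (h : '\n' ∉ l) :
    pvSubLineStart pat rep false (l ++ rest) = l ++ pvSubLineStart pat rep false rest := by
  induction l with
  | nil => rfl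
  | cons c t ih =>
    have hc : c ≠ '\n' := by intro hc; exact h (by simp [hc])
    simp only [List.cons_append, pvSubLineStart, Bool.false_and, Bool.false_eq_true]
    simp [beq_eq_false_iff_ne.mpr hc, ih (fun hm => h (List.mem_cons_of_mem _ hm))]

lemma pvSub_false_id (pat : Char) (rep l : List Char) (h : '\n' ∉ l) :
    pvSubLineStart pat rep false l = l := by
  have := pvSub_false_no_nl pat rep l [] h
  simpa [pvSubLineStart] using this

lemma pvSub_true_last (pat : Char) (rep l : List Char) (h : '\n' ∉ l) :
    pvSubLineStart pat rep true l = pvLineSub pat rep l := by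
  cases l with
  | nil => simp [pvSubLineStart, pvLineSub, PySem.Chars.startswith, List.isPrefixOf]
  | cons c t =>
    have ht : '\n' ∉ t := fun hm => h (List.mem_cons_of_mem _ hm)
    by_cases hc : c = pat
    · subst hc
      simp [pvSubLineStart, pvLineSub, PySem.Chars.startswith, List.isPrefixOf,
        pvSub_false_id _ rep t ht]
    · have hcn : c ≠ '\n' := fun hm => h (by simp [hm])
      simp [pvSubLineStart, pvLineSub, PySem.Chars.startswith, List.isPrefixOf,
        beq_eq_false_iff_ne.mpr hc, beq_eq_false_iff_ne.mpr (Ne.symm hc),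
        beq_eq_false_iff_ne.mpr hcn, pvSub_false_id pat rep t ht]

lemma pvSub_true_line (pat : Char) (rep l rest : List Char) (h : '\n' ∉ l) (hp : pat ≠ '\n') :
    pvSubLineStart pat rep true (l ++ '\n' :: rest)
      = pvLineSub pat rep l ++ '\n' :: pvSubLineStart pat rep true rest := by
  cases l with
  | nil =>
    simp [pvSubLineStart, pvLineSub, PySem.Chars.startswith, List.isPrefixOf,
      beq_eq_false_iff_ne.mpr (Ne.symm hp)]
  | cons c t =>
    have ht : '\n' ∉ t := fun hm => h (List.mem_cons_of_mem _ hm)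
    have hstep : pvSubLineStart pat rep false ('\n' :: rest)
        = '\n' :: pvSubLineStart pat rep true rest := by
      simp [pvSubLineStart]
    by_cases hc : c = pat
    · subst hc
      simp only [List.cons_append, pvSubLineStart, Bool.true_and, BEq.rfl, if_pos]
      rw [pvSub_false_no_nl _ rep t ('\n' :: rest) ht, hstep]
      simp [pvLineSub, PySem.Chars.startswith, List.isPrefixOf]
    · have hcn : c ≠ '\n' := fun hm => h (by simp [hm])
      simp only [List.cons_append, pvSubLineStart, Bool.true_and,
        beq_eq_false_iff_ne.mpr hc, Bool.false_eq_true, if_false,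
        beq_eq_false_iff_ne.mpr hcn]
      rw [pvSub_false_no_nl pat rep t ('\n' :: rest) ht, hstep]
      simp [pvLineSub, PySem.Chars.startswith, List.isPrefixOf,
        beq_eq_false_iff_ne.mpr (Ne.symm hc)]

lemma pvSub_join (pat : Char) (rep : List Char) (ls : List (List Char)) (hne : ls ≠ [])
    (hnl : ∀ l ∈ ls, '\n' ∉ l) (hp : pat ≠ '\n') :
    pvSubLineStart pat rep true (PySem.Chars.join ['\n'] ls)
      = PySem.Chars.join ['\n'] (ls.map (pvLineSub pat rep)) := by
  induction ls with
  | nil => exact absurd rfl hne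
  | cons l rest ih =>
    cases rest with
    | nil =>
      rw [PySem.Chars.join_singleton, List.map_singleton, PySem.Chars.join_singleton]
      exact pvSub_true_last pat rep l (hnl l (by simp))
    | cons l2 t2 =>
      rw [PySem.Chars.join_cons_cons, List.map_cons, List.map_cons,
        PySem.Chars.join_cons_cons, List.append_assoc, List.singleton_append]
      rw [pvSub_true_line pat rep l _ (hnl l (by simp)) hp]
      rw [ih (by simp) (fun x hx => hnl x (List.mem_cons_of_mem _ hx))]
      simp [List.append_assoc]

lemma pv_compose (l : List Char) :
    pvLineSub '+' "ㅤ✦".toList (pvLineSub '-' "➣".toList l) = pvF l := by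
  cases l with
  | nil => decide
  | cons c t =>
    by_cases h1 : c = '-'
    · subst h1
      simp [pvLineSub, pvF, PySem.Chars.startswith, List.isPrefixOf]
    · by_cases h2 : c = '+'
      · subst h2
        simp [pvLineSub, pvF, PySem.Chars.startswith, List.isPrefixOf]
      · simp [pvLineSub, pvF, PySem.Chars.startswith, List.isPrefixOf,
          beq_eq_false_iff_ne.mpr (Ne.symm h1), beq_eq_false_iff_ne.mpr (Ne.symm h2)]

lemma pv_foldl_enum_set (c1 c2 : String → Bool) (f1 f2 : String → String)
    (pre xs : List String) :
    (PySem.List.enumerate xs (pre.length : Int)).foldl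
      (fun acc (p : Int × String) =>
        if c1 p.2 then acc.set p.1.toNat (f1 p.2)
        else if c2 p.2 then acc.set p.1.toNat (f2 p.2) else acc)
      (pre ++ xs)
    = pre ++ xs.map (fun x => if c1 x then f1 x else if c2 x then f2 x else x) := by
  induction xs generalizing pre with
  | nil => simp [PySem.List.enumerate]
  | cons x xs ih =>
    rw [PySem.List.enumerate_cons, List.foldl_cons]
    have hset : ∀ v : String, (pre ++ x :: xs).set ((pre.length : Int)).toNat v
        = (pre ++ [v]) ++ xs := by
      intro v
      rw [Int.toNat_natCast, List.set_append]
      simp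
    have hlen : ∀ v : String, ((pre.length : Int) + 1) = (((pre ++ [v]).length : Nat) : Int) := by
      intro v; simp
    by_cases hx1 : c1 x
    · simp only [hx1, if_true, hset (f1 x)]
      rw [hlen (f1 x), ih]
      simp [hx1]
    · by_cases hx2 : c2 x
      · simp only [hx1, hx2, if_true, Bool.false_eq_true, if_false, hset (f2 x)]
        rw [hlen (f2 x), ih]
        simp [hx1, hx2]
      · simp only [hx1, hx2, Bool.false_eq_true, if_false]
        have : pre ++ x :: xs = (pre ++ [x]) ++ xs := by simp
        rw [this, hlen x, ih]
        simp [hx1, hx2]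

lemma pv_no_nl_lineSub (pat : Char) (rep l : List Char) (hr : '\n' ∉ rep) (hl : '\n' ∉ l) :
    '\n' ∉ pvLineSub pat rep l := by
  unfold pvLineSub
  split
  · intro hm
    rcases List.mem_append.mp hm with hm | hm
    · exact hr hm
    · exact hl (List.tail_subset l hm)
  · exact hl

lemma pv_line_bridge (l : List Char) :
    (if PySem.Str.startswith (String.ofList l) "-" then
        String.ofList ("➣".toList ++ (PySem.Str.slice (String.ofList l) (some 1) none).toList)
      else if PySem.Str.startswith (String.ofList l) "+" then
        String.ofList ("ㅤ✦".toList ++ (PySem.Str.slice (String.ofList l) (some 1) none).toList)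
      else String.ofList l).toList = pvF l := by
  have h1 : "\n".toList = ['\n'] := by decide
  simp [pvF, PySem.List.slice_from_one]
  split
  · simp
  · split <;> simp

lemma pv_A_toList (d : String) :
    (reformat_description d).toList
      = PySem.Chars.join ['\n'] ((pvSplitNl d.toList).map pvF) := by
  unfold reformat_description
  have hsplit : PySem.Str.split? d "\n"
      = some (((pvSplitNl d.toList)).map String.ofList) := by
    have h1 : "\n".toList = ['\n'] := by decide
    simp [PySem.Str.split?, PySem.Chars.split?, h1, pvSplitOn_eq]
  rw [hsplit]
  simp only [Option.getD_some]
  have hfold := pv_foldl_enum_set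
    (fun s => PySem.Str.startswith s "-") (fun s => PySem.Str.startswith s "+")
    (fun s => String.ofList ("➣".toList ++ (PySem.Str.slice s (some 1) none).toList))
    (fun s => String.ofList ("ㅤ✦".toList ++ (PySem.Str.slice s (some 1) none).toList))
    [] ((pvSplitNl d.toList).map String.ofList)
  simp only [List.length_nil, Nat.cast_zero, List.nil_append] at hfold
  rw [hfold, PySem.Str.toList_join]
  have h1 : "\n".toList = ['\n'] := by decide
  rw [h1, List.map_map, List.map_map]
  congr 1
  apply List.map_congr_left
  intro l _
  simpa using pv_line_bridge l

lemma pv_B_toList (d : String) :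
    (reformat_description_alt d).toList
      = PySem.Chars.join ['\n'] ((pvSplitNl d.toList).map pvF) := by
  unfold reformat_description_alt
  rw [String.toList_ofList]
  conv_lhs => rw [← pvJoin_splitNl d.toList]
  rw [pvSub_join '-' "➣".toList (pvSplitNl d.toList) (pvSplitNl_ne_nil _)
    (pvSplitNl_no_nl _) (by decide)]
  rw [pvSub_join '+' "ㅤ✦".toList _ (by simp [pvSplitNl_ne_nil])
    (by
      intro l hl
      rcases List.mem_map.mp hl with ⟨l0, hl0, rfl⟩
      exact pv_no_nl_lineSub _ _ _ (by decide) (pvSplitNl_no_nl _ l0 hl0))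
    (by decide)]
  rw [List.map_map]
  congr 1
  apply List.map_congr_left
  intro l _
  exact pv_compose l

-- ===== VERDICT (by name: the statement is the Claim_ definition above) =====
theorem reformat_description_spec : Claim_equal_reformat_description := by
  intro d _hdom
  unfold Spec_reformat_description
  apply String.toList_inj.mp
  rw [pv_A_toList, pv_B_toList]
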